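-- pv_equiv track=rewrite | github.com/thomasluijkman/4Gvisualiser | analyser/analysis.py | filter_dictionary
-- ===== SOURCE A (Python) =====
-- def filter_dictionary(dictionary, flist):
--     new_dict = {}
--     for (k, v) in dictionary.items():
--         for fstring in flist:
--             if fstring in k:
--                 new_dict[k] = v
--                 break
--     return new_dict
-- ===== SOURCE B (Python) =====
-- def filter_dictionary(dictionary, flist):
--     matched = set()
--     remaining = list(dictionary)
--     for fstring in flist:
--         if not remaining:
--             break
--         still = []
--         for k in remaining:
--             if fstring in k:
--                 matched.add(k)
--             else:
--                 still.append(k)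
--         remaining = still
--     return {k: v for (k, v) in dictionary.items() if k in matched}
-- ===== Notes on version B (the rewrite author's own statement) =====
-- stated objective: alternative
-- what changed: B inverts the loop nesting: for each filter string it scans only the still-unmatched keys (a shrinking worklist), collecting matched keys in a set, then builds the result in one membership-filtered comprehension; A instead runs a break-on-first-match filter scan per key while mutating the output dict.
import Mathlib
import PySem

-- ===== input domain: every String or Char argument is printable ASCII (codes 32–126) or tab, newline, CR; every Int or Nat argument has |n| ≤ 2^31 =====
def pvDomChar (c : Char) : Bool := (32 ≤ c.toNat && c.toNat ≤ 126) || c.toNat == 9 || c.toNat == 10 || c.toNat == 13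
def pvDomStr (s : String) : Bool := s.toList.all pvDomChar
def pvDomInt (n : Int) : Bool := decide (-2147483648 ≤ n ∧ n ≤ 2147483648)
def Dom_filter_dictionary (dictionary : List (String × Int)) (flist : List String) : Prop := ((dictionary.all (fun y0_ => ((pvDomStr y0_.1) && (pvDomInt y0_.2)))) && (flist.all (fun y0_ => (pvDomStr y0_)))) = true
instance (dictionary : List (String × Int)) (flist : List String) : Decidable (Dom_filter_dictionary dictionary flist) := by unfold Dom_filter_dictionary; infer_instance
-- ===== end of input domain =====

-- B inverts the loop nesting: for each filter string it scans only the still-unmatched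
-- keys (a shrinking worklist), collecting matched keys in a set, then builds the result
-- with one membership-filtered comprehension (objective: alternative decomposition).

-- ===== PORT A =====
-- inner 'for fstring in flist: if fstring in k: new_dict[k] = v; break'
def pvLoopA (nd : PySem.Dict String Int) (k : String) (v : Int) : List String → PySem.Dict String Int
  | [] => nd
  | f :: rest => if PySem.Str.isIn f k then nd.insert k v else pvLoopA nd k v rest

def filter_dictionary (dictionary : List (String × Int)) (flist : List String) : List (String × Int) :=
  (dictionary.foldl (fun nd kv => pvLoopA nd kv.1 kv.2 flist) PySem.Dict.empty).items

-- ===== PORT B =====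
-- inner 'still = []; for k in remaining: if fstring in k: matched.add(k) else: still.append(k)'
def pvScan (f : String) (remaining : List String) (m : PySem.Set String) :
    PySem.Set String × List String :=
  remaining.foldl
    (fun p k => if PySem.Str.isIn f k then (PySem.Set.add p.1 k, p.2) else (p.1, p.2 ++ [k]))
    (m, [])

-- outer 'for fstring in flist: if not remaining: break; …'
def pvLoopB (m : PySem.Set String) (remaining : List String) : List String → PySem.Set String
  | [] => m
  | f :: rest =>
    if remaining = [] then m
    else
      let p := pvScan f remaining m
      pvLoopB p.1 p.2 rest

-- return {k: v for (k, v) in dictionary.items() if k in matched}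
def filter_dictionary_alt (dictionary : List (String × Int)) (flist : List String) : List (String × Int) :=
  let matched := pvLoopB PySem.Set.empty (dictionary.map (·.1)) flist
  (dictionary.foldl (fun nd kv => if matched.contains kv.1 then nd.insert kv.1 kv.2 else nd) PySem.Dict.empty).items

-- ===== PRECONDITION & SPEC =====
def Spec_filter_dictionary (dictionary : List (String × Int)) (flist : List String) (out : List (String × Int)) : Prop := out = filter_dictionary_alt dictionary flist
instance (dictionary : List (String × Int)) (flist : List String) (out : List (String × Int)) : Decidable (Spec_filter_dictionary dictionary flist out) := by unfold Spec_filter_dictionary; infer_instance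

-- ===== CLAIM (what is proved, stated in full; the proofs are below) =====
def Claim_equal_filter_dictionary : Prop := ∀ (dictionary : List (String × Int)) (flist : List String), Dom_filter_dictionary dictionary flist → Spec_filter_dictionary dictionary flist (filter_dictionary dictionary flist)

-- ===== LEMMAS AND PROOFS =====

-- A's inner break-loop inserts (k, v) iff some filter string occurs in k
theorem pvLoopA_eq (nd : PySem.Dict String Int) (k : String) (v : Int) (fl : List String) :
    pvLoopA nd k v fl = if fl.any (fun f => PySem.Str.isIn f k) then nd.insert k v else nd := by
  induction fl with
  | nil => simp [pvLoopA]
  | cons f rest ih =>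
    by_cases h : PySem.Chars.isIn f.toList k.toList <;> simp [pvLoopA, ih, h]

-- B's one-filter scan: the matched side gains the matching keys, the still side keeps the rest
theorem pvScan_fst_mem (f : String) (R : List String) (m : PySem.Set String) (x : String) :
    x ∈ (pvScan f R m).1 ↔ x ∈ m ∨ (x ∈ R ∧ PySem.Str.isIn f x) := by
  unfold pvScan
  suffices h : ∀ (acc : PySem.Set String × List String),
      x ∈ (R.foldl
        (fun p k => if PySem.Str.isIn f k then (PySem.Set.add p.1 k, p.2) else (p.1, p.2 ++ [k]))
        acc).1 ↔ x ∈ acc.1 ∨ (x ∈ R ∧ PySem.Str.isIn f x) by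
    simpa using h (m, [])
  induction R with
  | nil => simp
  | cons k rest ih =>
    intro acc
    by_cases h : PySem.Str.isIn f k
    · simp only [List.foldl_cons, h, if_pos, ih, PySem.Set.mem_add, List.mem_cons]
      constructor
      · rintro (⟨hx | rfl⟩ | ⟨hx, hf⟩)
        · exact Or.inl hx
        · exact Or.inr ⟨Or.inl rfl, h⟩
        · exact Or.inr ⟨Or.inr hx, hf⟩
      · rintro (hx | ⟨rfl | hx, hf⟩)
        · exact Or.inl (Or.inl hx)
        · exact Or.inl (Or.inr rfl)
        · exact Or.inr ⟨hx, hf⟩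
    · simp only [List.foldl_cons, h, if_neg, Bool.false_eq_true, not_false_iff, ih, List.mem_cons]
      constructor
      · rintro (hx | ⟨hx, hf⟩)
        · exact Or.inl hx
        · exact Or.inr ⟨Or.inr hx, hf⟩
      · rintro (hx | ⟨rfl | hx, hf⟩)
        · exact Or.inl hx
        · exact absurd hf h
        · exact Or.inr ⟨hx, hf⟩

theorem pvScan_snd (f : String) (R : List String) (m : PySem.Set String) :
    (pvScan f R m).2 = R.filter (fun k => !PySem.Str.isIn f k) := by
  unfold pvScan
  suffices h : ∀ (acc : PySem.Set String × List String),
      (R.foldl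
        (fun p k => if PySem.Str.isIn f k then (PySem.Set.add p.1 k, p.2) else (p.1, p.2 ++ [k]))
        acc).2 = acc.2 ++ R.filter (fun k => !PySem.Str.isIn f k) by
    simpa using h (m, [])
  induction R with
  | nil => simp
  | cons k rest ih =>
    intro acc
    by_cases h : PySem.Str.isIn f k
    · have h' : PySem.Chars.isIn f.toList k.toList = true := by simpa using h
      rw [List.foldl_cons, if_pos h, ih, List.filter_cons]
      simp [h']
    · have h' : PySem.Chars.isIn f.toList k.toList = false := by simpa using h
      rw [List.foldl_cons, if_neg h, ih, List.filter_cons]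
      simp [h']

-- B's outer loop: a key ends up matched iff it was already matched, or is still
-- in the worklist and some remaining filter string occurs in it
theorem pvLoopB_mem (fl : List String) (m : PySem.Set String) (R : List String) (x : String) :
    x ∈ pvLoopB m R fl ↔ x ∈ m ∨ (x ∈ R ∧ ∃ f ∈ fl, PySem.Str.isIn f x) := by
  induction fl generalizing m R with
  | nil => simp [pvLoopB]
  | cons f rest ih =>
    simp only [pvLoopB]
    by_cases hR : R = []
    · simp [hR]
    · rw [if_neg hR, ih, pvScan_fst_mem, pvScan_snd]
      simp only [List.mem_filter, Bool.not_eq_true', List.mem_cons]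
      by_cases hf : PySem.Str.isIn f x = true
      · simp only [hf]
        constructor
        · rintro ((hx | ⟨hx, _⟩) | ⟨⟨hx, hcontra⟩, _⟩)
          · exact Or.inl hx
          · exact Or.inr ⟨hx, f, Or.inl rfl, hf⟩
          · exact absurd hcontra (by simp)
        · rintro (hx | ⟨hx, _⟩)
          · exact Or.inl (Or.inl hx)
          · exact Or.inl (Or.inr ⟨hx, trivial⟩)
      · have hf' : PySem.Str.isIn f x = false := by simpa using hf
        simp only [hf']
        constructor
        · rintro ((hx | ⟨_, hcontra⟩) | ⟨⟨hx, _⟩, g, hg, hgx⟩)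
          · exact Or.inl hx
          · exact absurd hcontra (by simp)
          · exact Or.inr ⟨hx, g, Or.inr hg, hgx⟩
        · rintro (hx | ⟨hx, g, (rfl | hg), hgx⟩)
          · exact Or.inl (Or.inl hx)
          · exact absurd hgx hf
          · exact Or.inr ⟨⟨hx, trivial⟩, g, hg, hgx⟩

-- for a key occurring in the dictionary, the matched set answers exactly A's inner test
theorem contains_matched (d : List (String × Int)) (fl : List String) (kv : String × Int)
    (hkv : kv ∈ d) :
    (pvLoopB PySem.Set.empty (d.map (·.1)) fl).contains kv.1
      = fl.any (fun f => PySem.Str.isIn f kv.1) := by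
  rw [Bool.eq_iff_iff, PySem.Set.contains_iff, pvLoopB_mem, List.any_eq_true]
  simp only [PySem.Set.empty]
  constructor
  · rintro (hx | ⟨_, f, hf, hin⟩)
    · simp at hx
    · exact ⟨f, hf, hin⟩
  · rintro ⟨f, hf, hin⟩
    exact Or.inr ⟨List.mem_map_of_mem hkv, f, hf, hin⟩

-- ===== VERDICT (by name: the statement is the Claim_ definition above) =====
theorem filter_dictionary_spec : Claim_equal_filter_dictionary := by
  intro d fl _
  unfold Spec_filter_dictionary filter_dictionary filter_dictionary_alt
  congr 1
  apply PySem.List.foldl_congr_mem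
  intro acc kv hkv
  rw [pvLoopA_eq, contains_matched d fl kv hkv]
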